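-- pv_equiv track=rewrite | github.com/zsjohny/st2 | st2common/st2common/jinja/filters/json_escape.py | json_escape
-- ===== SOURCE A (Python) =====
-- import collections
--
-- def json_escape(value, indent=4, allow_unicode=True):
--     """
--     Backspace is replaced with \b
--     Form feed is replaced with \f
--     Newline is replaced with \n
--     Carriage return is replaced with \r
--     Tab is replaced with \t
--     Double quote is replaced with \"
--     Backslash is replaced with \\
--     """
--
--     replace_dict = collections.OrderedDict([
--         ("\\", r"\\\\"),  # backslash (MUST go 1st so it doesn't escape \ inserted by another match)
--         ('\"', r'\\"'),  # double quote
--         ("\b", r"\\b"),  # backspace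
--         ("\t", r"\\t"),  # tab
--         ("\n", r"\\n"),  # newline
--
--         # These don't work yet, and I hate them because they are stupid.
--         # ("\f", r"\\f"),  # form feed (this doesn't work and I hate it)
--         # ("\r", r"\\r"),  # carriage return
--     ])
--     value = str(value)
--     for old, new in replace_dict.items():
--         value = value.replace(old, new)
--
--     return value
-- ===== SOURCE B (Python) =====
-- def json_escape(value, indent=4, allow_unicode=True):
--     """Escape special characters for JSON in one pass with an if/elif chain."""
--     out = []
--     for ch in str(value):
--         if ch == "\\":
--             out.append("\\\\\\\\")
--         elif ch == '"':
--             out.append('\\\\"')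
--         elif ch == "\b":
--             out.append("\\\\b")
--         elif ch == "\t":
--             out.append("\\\\t")
--         elif ch == "\n":
--             out.append("\\\\n")
--         else:
--             out.append(ch)
--     return "".join(out)
-- ===== Notes on version B (the rewrite author's own statement) =====
-- stated objective: simpler
-- what changed: A's five sequential full-string str.replace passes (driven by an ordered dict) are replaced by a single character-wise pass with an if/elif chain appending each character's escape to a list that is joined once.
import Mathlib
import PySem

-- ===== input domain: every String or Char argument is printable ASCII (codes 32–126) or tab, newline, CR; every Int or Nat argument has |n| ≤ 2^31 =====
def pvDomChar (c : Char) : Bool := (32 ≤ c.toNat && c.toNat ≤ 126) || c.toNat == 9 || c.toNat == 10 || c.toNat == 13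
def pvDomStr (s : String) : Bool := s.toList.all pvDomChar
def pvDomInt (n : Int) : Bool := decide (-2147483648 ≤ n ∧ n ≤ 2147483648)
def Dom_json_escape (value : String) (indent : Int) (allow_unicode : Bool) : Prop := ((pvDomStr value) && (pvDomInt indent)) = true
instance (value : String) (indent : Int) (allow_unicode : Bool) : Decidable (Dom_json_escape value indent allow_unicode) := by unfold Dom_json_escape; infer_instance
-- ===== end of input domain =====

-- B replaces A's five sequential full-string replace passes (ordered dict + str.replace)
-- by one character-wise pass with an if/elif chain; objective: simpler (one traversal).

-- ===== PORT A =====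
-- A: build an ordered dict of (old, new) string pairs, then apply str.replace for each pair in order.
def json_escape (value : String) (indent : Int) (allow_unicode : Bool) : String :=
  let replace_dict : PySem.Dict String String := PySem.Dict.ofList
    [("\\", "\\\\\\\\"), ("\"", "\\\\\""), ("\x08", "\\\\b"), ("\t", "\\\\t"), ("\n", "\\\\n")]
  replace_dict.items.foldl (fun v p => PySem.Str.replace v p.1 p.2) value

-- ===== PORT B =====
-- B: one pass over the characters, if/elif chain per character, pieces concatenated.
-- The Python loop 'for ch in …: out.append(…)' + ''.join(out) becomes this structural recursion.
def jsonEscapeGoB : List Char → List Char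
  | [] => []
  | ch :: rest =>
    (if ch = '\\' then ['\\', '\\', '\\', '\\']
     else if ch = '"' then ['\\', '\\', '"']
     else if ch = '\x08' then ['\\', '\\', 'b']
     else if ch = '\t' then ['\\', '\\', 't']
     else if ch = '\n' then ['\\', '\\', 'n']
     else [ch]) ++ jsonEscapeGoB rest

def json_escape_alt (value : String) (indent : Int) (allow_unicode : Bool) : String :=
  String.ofList (jsonEscapeGoB value.toList)

-- ===== PRECONDITION & SPEC =====
def Spec_json_escape (value : String) (indent : Int) (allow_unicode : Bool) (out : String) : Prop := out = json_escape_alt value indent allow_unicode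
instance (value : String) (indent : Int) (allow_unicode : Bool) (out : String) : Decidable (Spec_json_escape value indent allow_unicode out) := by unfold Spec_json_escape; infer_instance

-- ===== CLAIM (what is proved, stated in full; the proofs are below) =====
def Claim_equal_json_escape : Prop := ∀ (value : String) (indent : Int) (allow_unicode : Bool), Dom_json_escape value indent allow_unicode → Spec_json_escape value indent allow_unicode (json_escape value indent allow_unicode)

-- ===== LEMMAS AND PROOFS =====

-- one step of Chars.replace.go with a single-character pattern
theorem go_single (c : Char) (new : List Char) :
    ∀ (l : List Char) (acc : List Char) (fuel : Nat), l.length ≤ fuel →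
      PySem.Chars.replace.go [c] new fuel l acc
        = acc.reverse ++ l.flatMap (fun x => if x == c then new else [x]) := by
  intro l
  induction l with
  | nil =>
    intro acc fuel _
    cases fuel <;> simp [PySem.Chars.replace.go]
  | cons h t ih =>
    intro acc fuel hf
    cases fuel with
    | zero => simp at hf
    | succ n =>
      by_cases hc : h = c
      · subst hc
        simp only [PySem.Chars.replace.go, List.isPrefixOf, BEq.rfl, Bool.true_and,
          List.isPrefixOf_nil_left, if_true]
        simp only [List.length_cons, Nat.succ_le_succ_iff] at hf
        rw [show List.drop [h].length (h :: t) = t from rfl]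
        rw [ih _ n hf]
        simp
      · have hpre : List.isPrefixOf [c] (h :: t) = false := by
          simp only [List.isPrefixOf, List.isPrefixOf_nil_left, Bool.and_true, beq_eq_false_iff_ne]
          exact fun hh => hc hh.symm
        simp only [PySem.Chars.replace.go, hpre, if_false]
        simp only [List.length_cons, Nat.succ_le_succ_iff] at hf
        rw [ih _ n hf]
        simp [hc]

theorem replace_single (cs : List Char) (c : Char) (new : List Char) :
    PySem.Chars.replace cs [c] new = cs.flatMap (fun x => if x == c then new else [x]) := by
  rw [PySem.Chars.replace]
  simp only [List.isEmpty, if_false]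
  rw [go_single c new cs [] cs.length (le_refl _)]
  simp

-- the common per-character escape function both sides compute
def escChar (x : Char) : List Char :=
  if x == '\\' then ['\\', '\\', '\\', '\\']
  else if x == '"' then ['\\', '\\', '"']
  else if x == '\x08' then ['\\', '\\', 'b']
  else if x == '\t' then ['\\', '\\', 't']
  else if x == '\n' then ['\\', '\\', 'n']
  else [x]

theorem a_toList (v : String) (i : Int) (u : Bool) :
    (json_escape v i u).toList = v.toList.flatMap escChar := by
  have h : json_escape v i u =
      PySem.Str.replace (PySem.Str.replace (PySem.Str.replace (PySem.Str.replace
        (PySem.Str.replace v "\\" "\\\\\\\\") "\"" "\\\\\"") "\x08" "\\\\b") "\t" "\\\\t") "\n" "\\\\n" := rfl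
  rw [h]
  simp only [PySem.Str.toList_replace]
  rw [show ("\\" : String).toList = ['\\'] from rfl, show ("\\\\\\\\" : String).toList = ['\\','\\','\\','\\'] from rfl,
      show ("\"" : String).toList = ['"'] from rfl, show ("\\\\\"" : String).toList = ['\\','\\','"'] from rfl,
      show ("\x08" : String).toList = ['\x08'] from rfl, show ("\\\\b" : String).toList = ['\\','\\','b'] from rfl,
      show ("\t" : String).toList = ['\t'] from rfl, show ("\\\\t" : String).toList = ['\\','\\','t'] from rfl,
      show ("\n" : String).toList = ['\n'] from rfl, show ("\\\\n" : String).toList = ['\\','\\','n'] from rfl]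
  rw [replace_single, replace_single, replace_single, replace_single, replace_single]
  rw [List.flatMap_assoc, List.flatMap_assoc, List.flatMap_assoc, List.flatMap_assoc]
  have hfun : ∀ x : Char,
      (List.flatMap (fun a => List.flatMap (fun b => List.flatMap (fun c =>
        List.flatMap (fun d => if d == '\n' then ['\\','\\','n'] else [d])
          (if c == '\t' then ['\\','\\','t'] else [c]))
          (if b == '\x08' then ['\\','\\','b'] else [b]))
          (if a == '"' then ['\\','\\','"'] else [a]))
          (if x == '\\' then ['\\','\\','\\','\\'] else [x])) = escChar x := by
    intro x
    by_cases h1 : x = '\\'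
    · subst h1; decide
    by_cases h2 : x = '"'
    · subst h2; decide
    by_cases h3 : x = '\x08'
    · subst h3; decide
    by_cases h4 : x = '\t'
    · subst h4; decide
    by_cases h5 : x = '\n'
    · subst h5; decide
    simp [escChar, h1, h2, h3, h4, h5]
  exact List.flatMap_congr (fun x _ => hfun x)

theorem goB_eq_flatMap (l : List Char) : jsonEscapeGoB l = l.flatMap escChar := by
  induction l with
  | nil => simp [jsonEscapeGoB]
  | cons h t ih =>
    rw [jsonEscapeGoB, ih, List.flatMap_cons]
    congr 1
    simp only [escChar, beq_iff_eq]

theorem b_toList (v : String) (i : Int) (u : Bool) :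
    (json_escape_alt v i u).toList = v.toList.flatMap escChar := by
  unfold json_escape_alt
  rw [goB_eq_flatMap, String.toList_ofList]

-- ===== VERDICT (by name: the statement is the Claim_ definition above) =====
theorem json_escape_spec : Claim_equal_json_escape := by
  intro value indent allow_unicode _
  unfold Spec_json_escape
  apply String.toList_inj.mp
  rw [a_toList, b_toList]
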